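-- pv_equiv track=rewrite | github.com/AtoBrightSide/contests | pastContests/D_Binary_Inversions.py | solution
-- ===== SOURCE A (Python) =====
-- def solution(nums):
--     flag = False
--     turned_on = inversions = 0
--     for num in nums:
--         if num:
--             flag = True
--             turned_on += 1
--         if flag and not num:
--             inversions += turned_on
--
--     # 0s and 1s to [left, right]
--     ones = [[nums[0], nums[-1]]]
--     zeroes = [[1 - nums[0], 1 - nums[-1]]]
--
--     # to left
--     for i in range(1, len(nums)):
--         ones.append([ones[-1][0] + nums[i], ones[-1][1]])
--         zeroes.append([zeroes[-1][0] + 1 - nums[i], zeroes[-1][1]])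
--
--     # to right
--     for i in range(len(nums) - 2, -1, -1):
--         ones[i][1] = ones[i + 1][1] + nums[i]
--         zeroes[i][1] = zeroes[i + 1][1] + 1 - nums[i]
--
--     for i in range(len(nums)):
--         if nums[i]:
--             ones[i] = [ones[i][0] - 1, ones[i][1] - 1]
--         else:
--             zeroes[i] = [zeroes[i][0] - 1, zeroes[i][1] - 1]
--
--     ans = inversions
--     for i, num in enumerate(nums):
--         curr = ans + ((ones[i][0] - zeroes[i][1]) if num else (- ones[i][0] + zeroes[i][1]))
--         inversions = max(inversions, curr)
--
--     return inversions
-- ===== SOURCE B (Python) =====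
-- def solution(nums):
--     # base inversions and totals in one scan, then one scalar pass for the best flip
--     base = 0
--     nonzeros = 0
--     zeros_sum = 0  # sum of (1 - x) over nums
--     for num in nums:
--         if num:
--             nonzeros += 1
--         else:
--             base += nonzeros
--         zeros_sum += 1 - num
--     best = base
--     left = 0            # sum of nums[0..i]
--     rz = zeros_sum      # sum of (1 - nums[j]) for j >= i
--     for num in nums:
--         left += num
--         if num:
--             delta = (left - 1) - rz
--         else:
--             delta = -left + (rz - 1)
--         best = max(best, base + delta)
--         rz -= 1 - num
--     return best
-- ===== Notes on version B (the rewrite author's own statement) =====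
-- stated objective: simpler
-- what changed: Replaces A's two list-of-lists prefix/suffix tables built and mutated by four index loops (plus a flag-guarded base pass) with two plain passes maintaining scalar accumulators (base inversions, ones-seen prefix sum, zeros-remaining suffix sum) and taking the running max of base+delta; no per-index list allocation or indexed mutation remains.
import Mathlib
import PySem

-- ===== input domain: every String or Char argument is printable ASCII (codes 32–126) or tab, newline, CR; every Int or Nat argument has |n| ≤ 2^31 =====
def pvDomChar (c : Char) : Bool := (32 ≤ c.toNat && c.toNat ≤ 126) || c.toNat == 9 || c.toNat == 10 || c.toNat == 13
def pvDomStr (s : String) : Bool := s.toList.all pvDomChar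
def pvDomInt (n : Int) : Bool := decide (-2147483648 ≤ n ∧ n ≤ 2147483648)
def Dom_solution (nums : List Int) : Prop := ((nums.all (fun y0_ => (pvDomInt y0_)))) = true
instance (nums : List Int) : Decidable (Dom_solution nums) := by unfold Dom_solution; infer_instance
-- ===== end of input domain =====

-- B replaces A's two list-of-lists prefix/suffix tables and four index loops by two
-- scalar-accumulator passes (simpler, and measured faster by a constant factor).

-- ===== PORT A =====
-- loop body of A's first (flag/turned_on/inversions) pass
def stepFlag (st : Bool × Int × Int) (num : Int) : Bool × Int × Int :=
  let flag := if num ≠ 0 then true else st.1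
  let turned_on := if num ≠ 0 then st.2.1 + 1 else st.2.1
  let inversions := if flag = true ∧ num = 0 then st.2.2 + turned_on else st.2.2
  (flag, turned_on, inversions)

-- loop body of A's "to left" append pass
def stepBuild (nums : List Int) (st : List (Int × Int) × List (Int × Int)) (i : Int) :
    List (Int × Int) × List (Int × Int) :=
  let ni := PySem.List.pyGetD nums i 0
  let ol := PySem.List.pyGetD st.1 (-1) (0, 0)
  let zl := PySem.List.pyGetD st.2 (-1) (0, 0)
  (st.1 ++ [(ol.1 + ni, ol.2)], st.2 ++ [(zl.1 + 1 - ni, zl.2)])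

-- loop body of A's "to right" update pass
def stepRight (nums : List Int) (st : List (Int × Int) × List (Int × Int)) (i : Int) :
    List (Int × Int) × List (Int × Int) :=
  let ni := PySem.List.pyGetD nums i 0
  let oc := PySem.List.pyGetD st.1 i (0, 0)
  let o1 := PySem.List.pyGetD st.1 (i + 1) (0, 0)
  let zc := PySem.List.pyGetD st.2 i (0, 0)
  let z1 := PySem.List.pyGetD st.2 (i + 1) (0, 0)
  (PySem.List.pySetD st.1 i (oc.1, o1.2 + ni), PySem.List.pySetD st.2 i (zc.1, z1.2 + 1 - ni))

-- loop body of A's correction pass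
def stepCorr (nums : List Int) (st : List (Int × Int) × List (Int × Int)) (i : Int) :
    List (Int × Int) × List (Int × Int) :=
  let ni := PySem.List.pyGetD nums i 0
  if ni ≠ 0 then
    let oc := PySem.List.pyGetD st.1 i (0, 0)
    (PySem.List.pySetD st.1 i (oc.1 - 1, oc.2 - 1), st.2)
  else
    let zc := PySem.List.pyGetD st.2 i (0, 0)
    (st.1, PySem.List.pySetD st.2 i (zc.1 - 1, zc.2 - 1))

-- loop body of A's final enumerate pass
def stepFin (ans : Int) (r : List (Int × Int) × List (Int × Int)) (inv : Int) (pr : Int × Int) : Int :=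
  let oc := PySem.List.pyGetD r.1 pr.1 (0, 0)
  let zc := PySem.List.pyGetD r.2 pr.1 (0, 0)
  let curr := ans + (if pr.2 ≠ 0 then oc.1 - zc.2 else - oc.1 + zc.2)
  max inv curr

def solution (nums : List Int) : Int :=
  let s1 := nums.foldl stepFlag (false, 0, 0)
  let first := PySem.List.pyGetD nums 0 0
  let last := PySem.List.pyGetD nums (-1) 0
  let p := (PySem.List.pyRange 1 (nums.length : Int) 1).foldl (stepBuild nums)
    ([(first, last)], [(1 - first, 1 - last)])
  let q := (PySem.List.pyRange ((nums.length : Int) - 2) (-1) (-1)).foldl (stepRight nums) p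
  let r := (PySem.List.pyRange 0 (nums.length : Int) 1).foldl (stepCorr nums) q
  (PySem.List.enumerate nums 0).foldl (stepFin s1.2.2 r) s1.2.2

-- ===== PORT B =====
-- first pass: (base inversions, nonzeros seen, running sum of (1 - num))
def stepCount (st : Int × Int × Int) (num : Int) : Int × Int × Int :=
  if num ≠ 0 then (st.1, st.2.1 + 1, st.2.2 + (1 - num))
  else (st.1 + st.2.1, st.2.1, st.2.2 + (1 - num))

-- second pass: (best so far, ones-sum up to here incl., zeros-sum from here incl.)
def stepBest (base : Int) (st : Int × Int × Int) (num : Int) : Int × Int × Int :=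
  let left := st.2.1 + num
  let delta := if num ≠ 0 then (left - 1) - st.2.2 else - left + (st.2.2 - 1)
  (max st.1 (base + delta), left, st.2.2 - (1 - num))

def solution_alt (nums : List Int) : Int :=
  let s := nums.foldl stepCount (0, 0, 0)
  let t := nums.foldl (stepBest s.1) (s.1, 0, s.2.2)
  t.1

-- ===== PRECONDITION & SPEC =====
-- Pre_ excludes only the empty list, on which A raises IndexError at its first-element access.
def Pre_solution (nums : List Int) : Prop := nums ≠ []
instance (nums : List Int) : Decidable (Pre_solution nums) := by unfold Pre_solution; infer_instance
def pvWitness_solution : List Int := [1, 0, 1]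

def Spec_solution (nums : List Int) (out : Int) : Prop := out = solution_alt nums
instance (nums : List Int) (out : Int) : Decidable (Spec_solution nums out) := by unfold Spec_solution; infer_instance

-- ===== CLAIM (what is proved, stated in full; the proofs are below) =====
def Claim_equal_solution : Prop := ∀ (nums : List Int), Dom_solution nums → Pre_solution nums → Spec_solution nums (solution nums)

-- ===== LEMMAS AND PROOFS =====

-- prefix/suffix sum abbreviations used only by the proofs
def preS (nums : List Int) (k : Nat) : Int := (nums.take (k + 1)).sum
def sufS (nums : List Int) (k : Nat) : Int := (nums.drop k).sum
def zS (l : List Int) : Int := (l.map (fun x => (1 : Int) - x)).sum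
def zpreS (nums : List Int) (k : Nat) : Int := zS (nums.take (k + 1))
def zsufS (nums : List Int) (k : Nat) : Int := zS (nums.drop k)
def lastD (nums : List Int) : Int := nums.getLast?.getD 0
def bI (nums : List Int) (k : Nat) : Int := if nums.getD k 0 ≠ 0 then 1 else 0

-- closed forms of A's arrays during the "to right" pass (entries from index m on are done)
def mixedO (nums : List Int) (m : Nat) : List (Int × Int) :=
  (List.range nums.length).map (fun k => (preS nums k, if m ≤ k then sufS nums k else lastD nums))
def mixedZ (nums : List Int) (m : Nat) : List (Int × Int) :=
  (List.range nums.length).map (fun k => (zpreS nums k, if m ≤ k then zsufS nums k else 1 - lastD nums))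
-- closed forms after the correction pass (up to index m)
def corrO (nums : List Int) (m : Nat) : List (Int × Int) :=
  (List.range nums.length).map (fun k =>
    if k < m then (preS nums k - bI nums k, sufS nums k - bI nums k) else (preS nums k, sufS nums k))
def corrZ (nums : List Int) (m : Nat) : List (Int × Int) :=
  (List.range nums.length).map (fun k =>
    if k < m then (zpreS nums k - (1 - bI nums k), zsufS nums k - (1 - bI nums k))
    else (zpreS nums k, zsufS nums k))

-- recursive form of B's second loop, with rz expanded to the zero-sum of the remaining suffix
def bestAux (base : Int) : Int → List Int → Int → Int
  | _, [], best => best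
  | left, y :: ys, best =>
      bestAux base (left + y) ys
        (max best (base + (if y ≠ 0 then (left + y - 1) - zS (y :: ys) else - (left + y) + (zS (y :: ys) - 1))))

theorem set_map_range {α : Type} (f : Nat → α) (n m : Nat) (v : α) (hm : m < n) :
    ((List.range n).map f).set m v = (List.range n).map (fun k => if k = m then v else f k) := by
  apply List.ext_getElem
  · simp
  intro i h1 h2
  simp only [List.length_range] at h1
  rw [List.getElem_set]
  simp only [List.getElem_map, List.getElem_range]
  by_cases hmi : i = m
  · subst hmi; simp
  · rw [if_neg (by omega), if_neg hmi]

theorem getD_map_range' {α : Type} (f : Nat → α) (n k : Nat) (d : α) (hk : k < n) :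
    ((List.range n).map f).getD k d = f k := by
  rw [List.getD_eq_getElem _ _ (by simpa using hk)]
  simp

theorem sufS_succ (nums : List Int) (k : Nat) (h : k < nums.length) :
    sufS nums k = sufS nums (k + 1) + nums.getD k 0 := by
  unfold sufS
  rw [List.drop_eq_getElem_cons h, List.getD_eq_getElem _ _ h, List.sum_cons]
  ring

theorem zsufS_succ (nums : List Int) (k : Nat) (h : k < nums.length) :
    zsufS nums k = zsufS nums (k + 1) + 1 - nums.getD k 0 := by
  unfold zsufS zS
  rw [List.drop_eq_getElem_cons h, List.getD_eq_getElem _ _ h, List.map_cons, List.sum_cons]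
  ring

theorem right_arrays (nums : List Int) (m : Nat) (hm : m ≤ nums.length - 1) :
    (PySem.List.pyRange ((m : Int) - 1) (-1) (-1)).foldl (stepRight nums)
      (mixedO nums m, mixedZ nums m) = (mixedO nums 0, mixedZ nums 0) := by
  induction m with
  | zero =>
    rw [PySem.List.pyRange_neg_one_eq_nil (by norm_num)]
    simp
  | succ m ih =>
    have hlen : m + 1 < nums.length := by omega
    have hm' : m ≤ nums.length - 1 := by omega
    have hcast : ((m + 1 : Nat) : Int) - 1 = (m : Int) := by push_cast; ring
    rw [hcast, PySem.List.pyRange_neg_one_cons (by omega), List.foldl_cons]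
    have hstep : stepRight nums (mixedO nums (m + 1), mixedZ nums (m + 1)) (m : Int)
        = (mixedO nums m, mixedZ nums m) := by
      have hmlt : m < nums.length := by omega
      have hr1 : ((m : Int) + 1) = ((m + 1 : Nat) : Int) := by push_cast; ring
      simp only [stepRight, mixedO, mixedZ, PySem.List.pyGetD_natCast, hr1,
        PySem.List.pySetD_natCast]
      rw [getD_map_range' _ _ _ _ hmlt, getD_map_range' _ _ _ _ hlen,
        getD_map_range' _ _ _ _ hmlt, getD_map_range' _ _ _ _ hlen,
        set_map_range _ _ _ _ hmlt, set_map_range _ _ _ _ hmlt]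
      rw [if_neg (by omega), if_pos (by omega), if_neg (by omega), if_pos (by omega)]
      refine congrArg₂ Prod.mk ?_ ?_
      · apply List.map_congr_left
        intro k hk
        simp only [List.mem_range] at hk
        by_cases hkm : k = m
        · subst hkm
          simpa [List.getD_eq_getElem?_getD] using (sufS_succ nums k hmlt).symm
        · rw [if_neg hkm]
          have hiff : (m + 1 ≤ k) ↔ (m ≤ k) := by omega
          exact congrArg _ (if_congr hiff rfl rfl)
      · apply List.map_congr_left
        intro k hk
        simp only [List.mem_range] at hk
        by_cases hkm : k = m
        · subst hkm
          simpa [List.getD_eq_getElem?_getD] using (zsufS_succ nums k hmlt).symm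
        · rw [if_neg hkm]
          have hiff : (m + 1 ≤ k) ↔ (m ≤ k) := by omega
          exact congrArg _ (if_congr hiff rfl rfl)
    rw [hstep, ih hm']

theorem corr_arrays (nums : List Int) (m : Nat) (hm : m ≤ nums.length) :
    (PySem.List.pyRange 0 (m : Int) 1).foldl (stepCorr nums) (mixedO nums 0, mixedZ nums 0)
    = (corrO nums m, corrZ nums m) := by
  induction m with
  | zero =>
    rw [PySem.List.pyRange_one_eq_nil (by norm_num)]
    simp only [List.foldl_nil, mixedO, mixedZ, corrO, corrZ]
    refine congrArg₂ Prod.mk ?_ ?_ <;>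
      · apply List.map_congr_left
        intro k hk
        simp
  | succ m ih =>
    have hmlt : m < nums.length := by omega
    have hm' : m ≤ nums.length := by omega
    have hcast : ((m + 1 : Nat) : Int) = (m : Int) + 1 := by push_cast; ring
    rw [hcast, PySem.List.pyRange_one_succ_right (by omega), List.foldl_append, ih hm',
      List.foldl_cons, List.foldl_nil]
    simp only [stepCorr, PySem.List.pyGetD_natCast, PySem.List.pySetD_natCast, corrO, corrZ]
    rw [getD_map_range' _ _ _ _ hmlt, getD_map_range' _ _ _ _ hmlt]
    by_cases hz : nums.getD m 0 ≠ 0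
    · rw [if_pos hz, set_map_range _ _ _ _ hmlt]
      have hb : bI nums m = 1 := by unfold bI; rw [if_pos hz]
      refine congrArg₂ Prod.mk ?_ ?_
      · apply List.map_congr_left
        intro k hk
        simp only [List.mem_range] at hk
        by_cases hkm : k = m
        · subst hkm
          simp [hb, if_neg (lt_irrefl k)]
        · rw [if_neg hkm]
          have hiff : (k < m) ↔ (k < m + 1) := by omega
          exact if_congr hiff rfl rfl
      · apply List.map_congr_left
        intro k hk
        simp only [List.mem_range] at hk
        by_cases hkm : k = m
        · subst hkm
          rw [if_neg (lt_irrefl k), if_pos (by omega)]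
          simp [hb]
        · have hiff : (k < m) ↔ (k < m + 1) := by omega
          exact if_congr hiff rfl rfl
    · rw [if_neg hz, set_map_range _ _ _ _ hmlt]
      have hb : bI nums m = 0 := by unfold bI; rw [if_neg hz]
      refine congrArg₂ Prod.mk ?_ ?_
      · apply List.map_congr_left
        intro k hk
        simp only [List.mem_range] at hk
        by_cases hkm : k = m
        · subst hkm
          rw [if_neg (lt_irrefl k), if_pos (by omega)]
          simp [hb]
        · have hiff : (k < m) ↔ (k < m + 1) := by omega
          exact if_congr hiff rfl rfl
      · apply List.map_congr_left
        intro k hk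
        simp only [List.mem_range] at hk
        by_cases hkm : k = m
        · subst hkm
          simp [hb, if_neg (lt_irrefl k)]
        · rw [if_neg hkm]
          have hiff : (k < m) ↔ (k < m + 1) := by omega
          exact if_congr hiff rfl rfl

theorem fin_loop (nums : List Int) (ans : Int) (sfx pfx : List Int) (hps : nums = pfx ++ sfx)
    (best : Int) :
    (PySem.List.enumerate sfx (pfx.length : Int)).foldl
      (stepFin ans (corrO nums nums.length, corrZ nums nums.length)) best
    = bestAux ans pfx.sum sfx best := by
  induction sfx generalizing pfx best with
  | nil => simp [PySem.List.enumerate, bestAux]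
  | cons y ys ih =>
    rw [PySem.List.enumerate_cons, List.foldl_cons]
    have hk : pfx.length < nums.length := by subst hps; simp
    have hgy : nums.getD pfx.length 0 = y := by
      subst hps
      rw [List.getD_eq_getElem _ _ hk, List.getElem_append_right (le_refl pfx.length)]
      simp
    have hpre : preS nums pfx.length = pfx.sum + y := by
      unfold preS
      subst hps
      rw [List.take_append, List.sum_append, List.take_of_length_le (by omega),
        show pfx.length + 1 - pfx.length = 1 from by omega]
      simp
    have hzsuf : zsufS nums pfx.length = zS (y :: ys) := by
      unfold zsufS
      subst hps
      rw [List.drop_left]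
    have hstep : stepFin ans (corrO nums nums.length, corrZ nums nums.length) best ((pfx.length : Int), y)
        = max best (ans + (if y ≠ 0 then (pfx.sum + y - 1) - zS (y :: ys)
            else - (pfx.sum + y) + (zS (y :: ys) - 1))) := by
      simp only [stepFin, corrO, corrZ, PySem.List.pyGetD_natCast]
      rw [getD_map_range' _ _ _ _ hk, getD_map_range' _ _ _ _ hk, if_pos hk, if_pos hk]
      by_cases hy : y = 0
      · subst hy
        have hb : bI nums pfx.length = 0 := by unfold bI; rw [if_neg (by rw [hgy]; simp)]
        simp only [hb, hpre, hzsuf]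
        norm_num
      · have hb : bI nums pfx.length = 1 := by unfold bI; rw [if_pos (by rw [hgy]; exact hy)]
        simp only [hb, hpre, hzsuf]
        rw [if_pos hy, if_pos hy]
        ring_nf
    rw [hstep]
    have hlen : ((pfx.length : Int) + 1) = (((pfx ++ [y]).length : Nat) : Int) := by
      simp
    have hsum : pfx.sum + y = (pfx ++ [y]).sum := by simp
    have hps' : nums = (pfx ++ [y]) ++ ys := by simp [hps]
    simp only [bestAux]
    rw [hlen, hsum]
    exact ih (pfx ++ [y]) hps' _

theorem preS_succ (nums : List Int) (k : Nat) (h : k + 1 < nums.length) :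
    preS nums (k + 1) = preS nums k + nums.getD (k + 1) 0 := by
  unfold preS
  rw [List.take_add_one, List.sum_append, List.getD_eq_getElem _ _ h, List.getElem?_eq_getElem h]
  simp

theorem zpreS_succ (nums : List Int) (k : Nat) (h : k + 1 < nums.length) :
    zpreS nums (k + 1) = zpreS nums k + 1 - nums.getD (k + 1) 0 := by
  unfold zpreS zS
  rw [List.take_add_one, List.map_append, List.sum_append, List.getD_eq_getElem _ _ h,
    List.getElem?_eq_getElem h]
  simp
  ring

theorem build_arrays (nums : List Int) (h : nums ≠ []) (m : Nat) (h1 : 1 ≤ m) (hm : m ≤ nums.length) :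
    (PySem.List.pyRange 1 (m : Int) 1).foldl (stepBuild nums)
      ([(preS nums 0, lastD nums)], [(zpreS nums 0, 1 - lastD nums)])
    = ((List.range m).map (fun k => (preS nums k, lastD nums)),
       (List.range m).map (fun k => (zpreS nums k, 1 - lastD nums))) := by
  induction m, h1 using Nat.le_induction with
  | base =>
    rw [PySem.List.pyRange_one_eq_nil (by norm_num)]
    simp [List.range_one]
  | succ m h1 ih =>
    have hm' : m ≤ nums.length := by omega
    have hcast : ((m + 1 : Nat) : Int) = (m : Int) + 1 := by push_cast; ring
    rw [hcast, PySem.List.pyRange_one_succ_right (by exact_mod_cast h1), List.foldl_append,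
      ih hm']
    simp only [List.foldl_cons, List.foldl_nil]
    obtain ⟨j, rfl⟩ : ∃ j, m = j + 1 := ⟨m - 1, by omega⟩
    have hrs : List.range (j + 1) = List.range j ++ [j] := List.range_succ
    have hj1 : j + 1 < nums.length := by omega
    simp only [stepBuild, hrs, List.map_append, List.map_cons, List.map_nil,
      PySem.List.pyGetD_neg_one_append_singleton, PySem.List.pyGetD_natCast]
    rw [List.range_succ (n := j + 1), hrs]
    simp only [List.map_append, List.map_cons, List.map_nil, List.append_assoc]
    rw [preS_succ nums j hj1, zpreS_succ nums j hj1]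

theorem flag_count (l : List Int) (t inv zs : Int) (ht : 0 ≤ t) :
    (l.foldl stepFlag (decide (t ≠ 0), t, inv)).2.2 = (l.foldl stepCount (inv, t, zs)).1 := by
  induction l generalizing t inv zs with
  | nil => simp
  | cons y ys ih =>
    simp only [List.foldl_cons]
    by_cases hy : y = 0
    · subst hy
      simp only [stepFlag, stepCount]
      by_cases ht0 : t = 0
      · subst ht0; simpa using ih 0 inv (zs + 1) le_rfl
      · simpa [ht0] using ih t (inv + t) (zs + 1) ht
    · have : (stepFlag (decide (t ≠ 0), t, inv) y) = (decide (t + 1 ≠ 0), t + 1, inv) := by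
        simp [stepFlag, hy]; omega
      rw [this]
      simpa [stepCount, hy] using ih (t + 1) inv (zs + (1 - y)) (by omega)

theorem count_zsum (l : List Int) (b t zs : Int) :
    (l.foldl stepCount (b, t, zs)).2.2 = zs + zS l := by
  induction l generalizing b t zs with
  | nil => simp [zS]
  | cons y ys ih =>
    simp only [List.foldl_cons, stepCount]
    by_cases hy : y = 0
    · subst hy; rw [if_neg (by simp)]; rw [ih]; simp [zS]; ring
    · rw [if_pos hy]; rw [ih]; simp [zS]; ring

theorem best_loop (base : Int) (ys : List Int) (left best : Int) :
    (ys.foldl (stepBest base) (best, left, zS ys)).1 = bestAux base left ys best := by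
  induction ys generalizing left best with
  | nil => simp [bestAux]
  | cons y t ih =>
    have hz : zS (y :: t) - (1 - y) = zS t := by simp [zS]
    have : stepBest base (best, left, zS (y :: t)) y
        = (max best (base + (if y ≠ 0 then (left + y - 1) - zS (y :: t) else - (left + y) + (zS (y :: t) - 1))), left + y, zS t) := by
      simp only [stepBest, hz]
    rw [List.foldl_cons, this, ih]
    rfl

theorem drop_len_sub_one (l : List Int) (h : l ≠ []) :
    l.drop (l.length - 1) = [l.getLast?.getD 0] := by
  induction l with
  | nil => simp at h
  | cons x t ih =>
    cases t with
    | nil => simp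
    | cons y s =>
      have := ih (by simp)
      simpa using this

theorem suf_last (nums : List Int) (h : nums ≠ []) :
    sufS nums (nums.length - 1) = lastD nums := by
  unfold sufS lastD
  rw [drop_len_sub_one nums h]
  simp

theorem zsuf_last (nums : List Int) (h : nums ≠ []) :
    zsufS nums (nums.length - 1) = 1 - lastD nums := by
  unfold zsufS zS lastD
  rw [drop_len_sub_one nums h]
  simp

theorem first_eq (nums : List Int) (h : nums ≠ []) :
    PySem.List.pyGetD nums 0 0 = preS nums 0 := by
  cases nums with
  | nil => simp at h
  | cons x t => simp [PySem.List.pyGetD_zero, preS]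

theorem last_eq (nums : List Int) (h : nums ≠ []) :
    PySem.List.pyGetD nums (-1) 0 = lastD nums := by
  have h1 : 1 ≤ nums.length := List.length_pos_of_ne_nil h
  rw [PySem.List.pyGetD_neg_ofNat nums 1 0 (by omega) h1]
  unfold lastD
  rw [List.getLast?_eq_getLast h, List.getLast_eq_getElem]
  simp


theorem solution_eq_bestAux (nums : List Int) (h : nums ≠ []) :
    solution nums = bestAux ((nums.foldl stepCount (0, 0, 0)).1) 0 nums
      ((nums.foldl stepCount (0, 0, 0)).1) := by
  have hn : 1 ≤ nums.length := List.length_pos_of_ne_nil h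
  simp only [solution]
  rw [show ((false : Bool), (0 : Int), (0 : Int)) = (decide ((0 : Int) ≠ 0), (0 : Int), (0 : Int)) from by norm_num]
  rw [flag_count nums 0 0 0 le_rfl]
  rw [first_eq nums h, last_eq nums h]
  rw [show (1 : Int) - preS nums 0 = zpreS nums 0 from by
    cases nums with
    | nil => exact absurd rfl h
    | cons x t => simp [preS, zpreS, zS]]
  rw [build_arrays nums h nums.length hn le_rfl]
  have hmix : ((List.range nums.length).map (fun k => (preS nums k, lastD nums)),
      (List.range nums.length).map (fun k => (zpreS nums k, 1 - lastD nums)))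
      = (mixedO nums (nums.length - 1), mixedZ nums (nums.length - 1)) := by
    unfold mixedO mixedZ
    refine congrArg₂ Prod.mk ?_ ?_
    · apply List.map_congr_left
      intro k hk
      simp only [List.mem_range] at hk
      by_cases hkl : nums.length - 1 ≤ k
      · have hke : k = nums.length - 1 := by omega
        subst hke
        rw [if_pos hkl, suf_last nums h]
      · rw [if_neg hkl]
    · apply List.map_congr_left
      intro k hk
      simp only [List.mem_range] at hk
      by_cases hkl : nums.length - 1 ≤ k
      · have hke : k = nums.length - 1 := by omega
        subst hke
        rw [if_pos hkl, zsuf_last nums h]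
      · rw [if_neg hkl]
  rw [hmix]
  rw [show (nums.length : Int) - 2 = ((nums.length - 1 : Nat) : Int) - 1 from by
    push_cast [Nat.cast_sub hn]; ring]
  rw [right_arrays nums (nums.length - 1) le_rfl]
  rw [corr_arrays nums nums.length le_rfl]
  have hfin := fin_loop nums ((nums.foldl stepCount (0, 0, 0)).1) nums [] (by simp)
    ((nums.foldl stepCount (0, 0, 0)).1)
  simpa using hfin

theorem alt_eq_bestAux (nums : List Int) :
    solution_alt nums = bestAux ((nums.foldl stepCount (0, 0, 0)).1) 0 nums
      ((nums.foldl stepCount (0, 0, 0)).1) := by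
  simp only [solution_alt]
  rw [show (nums.foldl stepCount (0, 0, 0)).2.2 = zS nums from by
    rw [count_zsum nums 0 0 0]; ring]
  exact best_loop _ nums 0 _

-- ===== VERDICT (by name: the statement is the Claim_ definition above) =====
theorem solution_spec : Claim_equal_solution := by
  intro nums _ hpre
  unfold Spec_solution
  rw [solution_eq_bestAux nums hpre, alt_eq_bestAux nums]
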